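-- pv_equiv track=rewrite | github.com/ktanen/static-site-generator | src/blocktype.py | is_heading
-- ===== SOURCE A (Python) =====
-- def is_heading(block):
--     count = 0
--     for char in block:
--         if char == "#":
--             count += 1
--         else:
--             break
--
--     if count == 0 or count > 6:
--         return False
--
--     if count >= len(block):
--         return False
--
--     if block[count] != " ":
--         return False
--     text = block[count + 1:]
--     if not text:
--         return False
--
--     return True
-- ===== SOURCE B (Python) =====
-- def is_heading(block):
--     parts = block.split(' ', 1)
--     if len(parts) < 2:
--         return False
--     prefix, text = parts
--     if not prefix or len(prefix) > 6:
--         return False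
--     if any(ch != '#' for ch in prefix):
--         return False
--     return bool(text)
-- ===== Notes on version B (the rewrite author's own statement) =====
-- stated objective: simpler
-- what changed: B replaces A's char-counting scan with index checks and a slice by a single split(' ', 1) followed by validation of the two parts (prefix is 1-6 '#' chars, remainder nonempty).
import Mathlib
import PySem

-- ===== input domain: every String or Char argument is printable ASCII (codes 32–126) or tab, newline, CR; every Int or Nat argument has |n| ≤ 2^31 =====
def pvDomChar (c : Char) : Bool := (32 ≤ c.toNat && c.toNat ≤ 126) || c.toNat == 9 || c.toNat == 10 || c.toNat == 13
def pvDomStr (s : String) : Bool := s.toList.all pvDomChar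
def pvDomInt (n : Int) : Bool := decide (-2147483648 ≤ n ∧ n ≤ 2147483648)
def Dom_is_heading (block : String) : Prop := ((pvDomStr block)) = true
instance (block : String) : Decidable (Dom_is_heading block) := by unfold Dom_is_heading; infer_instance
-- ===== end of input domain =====

-- B validates the two parts of split(' ', 1) instead of A's leading-'#' counting loop with index checks; objective: simpler.

-- ===== PORT A =====
-- the for/break loop counting leading '#' characters
def hashLoop : List Char → Nat → Nat
  | [], count => count
  | ch :: rest, count => if ch = '#' then hashLoop rest (count + 1) else count

def is_heading (block : String) : Bool :=
  let l := block.toList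
  let count := hashLoop l 0
  if count = 0 ∨ count > 6 then false
  else if count ≥ l.length then false
  else
    match PySem.List.pyGet? l (count : Int) with
    | none => false  -- unreachable: count < len(block) was just checked
    | some c =>
      if c ≠ ' ' then false
      else
        let text := PySem.List.slice l (some ((count : Int) + 1)) none
        if text = [] then false else true

-- ===== PORT B =====
def is_heading_alt (block : String) : Bool :=
  match PySem.Str.splitMax? block " " 1 with
  | none => false  -- unreachable: sep " " is nonempty
  | some parts =>
    match parts with
    | [pre, text] =>
      if pre.toList = [] ∨ pre.toList.length > 6 then false
      else if pre.toList.any (fun ch => ch ≠ '#') then false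
      else !text.toList.isEmpty
    | _ => false   -- len(parts) < 2: no space in block

-- ===== PRECONDITION & SPEC =====
def Spec_is_heading (block : String) (out : Bool) : Prop := out = is_heading_alt block
instance (block : String) (out : Bool) : Decidable (Spec_is_heading block out) := by unfold Spec_is_heading; infer_instance

-- ===== CLAIM (what is proved, stated in full; the proofs are below) =====
def Claim_equal_is_heading : Prop := ∀ (block : String), Dom_is_heading block → Spec_is_heading block (is_heading block)

-- ===== LEMMAS AND PROOFS =====

-- hashLoop counts the leading '#' run
theorem hashLoop_eq (l : List Char) (n : Nat) :
    hashLoop l n = (l.takeWhile (· = '#')).length + n := by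
  induction l generalizing n with
  | nil => simp [hashLoop]
  | cons c rest ih =>
    by_cases h : c = '#'
    · simp [hashLoop, h, ih]; omega
    · simp [hashLoop, h]

-- is_heading with its lets zeta-reduced (definitional)
theorem A_unfold (block : String) :
    is_heading block =
      (if hashLoop block.toList 0 = 0 ∨ hashLoop block.toList 0 > 6 then false
       else if hashLoop block.toList 0 ≥ block.toList.length then false
       else
         match PySem.List.pyGet? block.toList ((hashLoop block.toList 0 : Nat) : Int) with
         | none => false
         | some c =>
           if c ≠ ' ' then false
           else if PySem.List.slice block.toList (some (((hashLoop block.toList 0 : Nat) : Int) + 1)) none = [] then false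
           else true) := rfl

-- splitOnMax.go with maxsplit exhausted: the rest is one final piece
theorem go_zero (fuel : Nat) (l cur : List Char) (acc : List (List Char)) :
    PySem.Chars.splitOnMax.go [' '] fuel 0 l cur acc = ((cur.reverse ++ l) :: acc).reverse := by
  cases fuel <;> cases l <;> simp [PySem.Chars.splitOnMax.go]

-- splitOnMax.go with maxsplit 1: split at the first space, if any
theorem go_one (l : List Char) : ∀ (fuel : Nat), l.length + 1 ≤ fuel → ∀ (cur : List Char) (acc : List (List Char)),
    PySem.Chars.splitOnMax.go [' '] fuel 1 l cur acc =
      if ' ' ∈ l then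
        ((l.dropWhile (· ≠ ' ')).tail :: (cur.reverse ++ l.takeWhile (· ≠ ' ')) :: acc).reverse
      else ((cur.reverse ++ l) :: acc).reverse := by
  induction l with
  | nil =>
    intro fuel hf cur acc
    match fuel, hf with
    | fuel + 1, _ => simp [PySem.Chars.splitOnMax.go]
  | cons c rest ih =>
    intro fuel hf cur acc
    match fuel, hf with
    | fuel + 1, hf =>
      by_cases h : c = ' '
      · subst h
        simp [PySem.Chars.splitOnMax.go, List.isPrefixOf, go_zero]
      · have hstep : PySem.Chars.splitOnMax.go [' '] (fuel + 1) 1 (c :: rest) cur acc =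
            PySem.Chars.splitOnMax.go [' '] fuel 1 rest (c :: cur) acc := by
          simp [PySem.Chars.splitOnMax.go, List.isPrefixOf, Ne.symm h]
        rw [hstep, ih fuel (by simpa using Nat.succ_le_succ_iff.mp hf) (c :: cur) acc]
        simp [h, Ne.symm h]

-- the characterization of block.split(' ', 1)
theorem splitOnMax_one (l : List Char) :
    PySem.Chars.splitOnMax l [' '] 1 =
      if ' ' ∈ l then [l.takeWhile (· ≠ ' '), (l.dropWhile (· ≠ ' ')).tail] else [l] := by
  unfold PySem.Chars.splitOnMax
  rw [if_neg (by norm_num)]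
  have h1 : (1 : Int).toNat = 1 := rfl
  rw [h1, go_one l (l.length + 1) (Nat.le_refl _) [] []]
  by_cases hm : ' ' ∈ l <;> simp [hm]

-- B in closed form over the character list
theorem alt_char (block : String) :
    is_heading_alt block =
      if ' ' ∈ block.toList then
        (if block.toList.takeWhile (· ≠ ' ') = [] ∨ (block.toList.takeWhile (· ≠ ' ')).length > 6 then false
         else if (block.toList.takeWhile (· ≠ ' ')).any (fun ch => ch ≠ '#') then false
         else !((block.toList.dropWhile (· ≠ ' ')).tail).isEmpty)
      else false := by
  unfold is_heading_alt PySem.Str.splitMax? PySem.Chars.splitMax?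
  rw [if_neg (by decide)]
  have hsep : (" " : String).toList = [' '] := by decide
  rw [hsep, splitOnMax_one]
  by_cases hm : ' ' ∈ block.toList <;> simp [hm]

-- ' ' ∈ l splits l at its first space
theorem split_at_space (l : List Char) (h : ' ' ∈ l) :
    ∃ p t, l = p ++ ' ' :: t ∧ ∀ c ∈ p, c ≠ ' ' := by
  induction l with
  | nil => simp at h
  | cons c rest ih =>
    by_cases hc : c = ' '
    · exact ⟨[], rest, by simp [hc], by simp⟩
    · have hmem : ' ' ∈ rest := by
        rcases List.mem_cons.mp h with h' | h'
        · exact absurd h'.symm hc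
        · exact h'
      obtain ⟨p, t, h1, h2⟩ := ih hmem
      refine ⟨c :: p, t, by simp [h1], ?_⟩
      intro x hx
      rcases List.mem_cons.mp hx with hx' | hx'
      · exact hx' ▸ hc
      · exact h2 x hx'

theorem takeWhile_ne_space (p t : List Char) (hp : ∀ c ∈ p, c ≠ ' ') :
    (p ++ ' ' :: t).takeWhile (· ≠ ' ') = p ∧ (p ++ ' ' :: t).dropWhile (· ≠ ' ') = ' ' :: t := by
  induction p with
  | nil => simp [List.takeWhile_cons, List.dropWhile_cons]
  | cons c rest ih =>
    have hc := hp c (by simp)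
    have hih := ih (fun x hx => hp x (by simp [hx]))
    constructor
    · simpa [List.takeWhile_cons, hc] using hih.1
    · simpa [List.dropWhile_cons, hc] using hih.2

theorem takeWhile_hash_of_all_hash (p : List Char) (hall : ∀ c ∈ p, c = '#') (t : List Char) :
    (p ++ ' ' :: t).takeWhile (· = '#') = p := by
  induction p with
  | nil => simp [List.takeWhile_cons]
  | cons c rest ih =>
    have hc : c = '#' := hall c (by simp)
    simp only [List.cons_append, List.takeWhile_cons, hc]
    simp [ih (fun x hx => hall x (by simp [hx]))]

theorem takeWhile_hash_lt (p t : List Char) (h : ∃ c ∈ p, c ≠ '#') :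
    ((p ++ ' ' :: t).takeWhile (· = '#')).length < p.length := by
  induction p with
  | nil => simp at h
  | cons c rest ih =>
    by_cases hc : c = '#'
    · obtain ⟨x, hx, hxne⟩ := h
      have hx' : x ∈ rest := by
        rcases List.mem_cons.mp hx with hx' | hx'
        · exact absurd (hx' ▸ hc) hxne
        · exact hx'
      simp only [List.cons_append, List.takeWhile_cons, hc]
      simpa using Nat.succ_lt_succ (ih ⟨x, hx', hxne⟩)
    · simp [List.takeWhile_cons, hc]

-- ===== VERDICT (by name: the statement is the Claim_ definition above) =====
theorem is_heading_spec : Claim_equal_is_heading := by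
  intro block _
  unfold Spec_is_heading
  rw [alt_char, A_unfold]
  by_cases hm : ' ' ∈ block.toList
  · rw [if_pos hm]
    obtain ⟨p, t, hpt, hp⟩ := split_at_space _ hm
    obtain ⟨htake, hdropfull⟩ := takeWhile_ne_space p t hp
    rw [hpt, htake, hdropfull, List.tail_cons]
    by_cases hall : ∀ c ∈ p, c = '#'
    · have hcount : hashLoop (p ++ ' ' :: t) 0 = p.length := by
        rw [hashLoop_eq, takeWhile_hash_of_all_hash p hall t]
        omega
      rw [hcount]
      by_cases hz : p.length = 0 ∨ p.length > 6
      · have hp0 : p = [] ∨ p.length > 6 := by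
          rcases hz with h | h
          · exact Or.inl (List.length_eq_zero_iff.mp h)
          · exact Or.inr h
        rw [if_pos hz, if_pos hp0]
      · have hp0 : ¬ (p = [] ∨ p.length > 6) := by
          rcases not_or.mp hz with ⟨h1, h2⟩
          push_neg
          refine ⟨?_, by omega⟩
          intro h; exact h1 (by simp [h])
        have hanyf : p.any (fun ch => ch ≠ '#') = false := by
          simp only [List.any_eq_false]
          intro c hc; simpa using hall c hc
        rw [if_neg hz, if_neg (show ¬ p.length ≥ (p ++ ' ' :: t).length by simp),
          PySem.List.pyGet?_append_length p t ' ']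
        have hslice : PySem.List.slice (p ++ ' ' :: t) (some ((p.length : Int) + 1)) none = t := by
          have hcast : ((p.length : Int) + 1) = ((p.length + 1 : Nat) : Int) := by push_cast; ring
          rw [hcast, PySem.List.slice_from _ (by positivity)]
          simp
        rw [if_neg hp0, hanyf]
        simp only [Bool.false_eq_true, if_false, hslice]
        cases t <;> simp
    · push_neg at hall
      have hany : p.any (fun ch => ch ≠ '#') = true := by
        obtain ⟨c, hc, hne⟩ := hall
        exact List.any_eq_true.mpr ⟨c, hc, by simpa using hne⟩
      have hnp : hashLoop (p ++ ' ' :: t) 0 < p.length := by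
        rw [hashLoop_eq]
        simpa using takeWhile_hash_lt p t hall
      have hB : (if p = [] ∨ p.length > 6 then false
          else if p.any (fun ch => ch ≠ '#') then false
          else !t.isEmpty) = false := by
        by_cases h0 : p = [] ∨ p.length > 6
        · rw [if_pos h0]
        · rw [if_neg h0, hany]; simp
      rw [hB]
      by_cases hz : hashLoop (p ++ ' ' :: t) 0 = 0 ∨ hashLoop (p ++ ' ' :: t) 0 > 6
      · rw [if_pos hz]
      · rw [if_neg hz, if_neg (show ¬ hashLoop (p ++ ' ' :: t) 0 ≥ (p ++ ' ' :: t).length by simp; omega)]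
        have hget : PySem.List.pyGet? (p ++ ' ' :: t) ((hashLoop (p ++ ' ' :: t) 0 : Nat) : Int)
            = some (p[hashLoop (p ++ ' ' :: t) 0]'hnp) := by
          rw [PySem.List.pyGet?_natCast, List.getElem?_append_left hnp]
          simp [hnp]
        rw [hget]
        have hne : p[hashLoop (p ++ ' ' :: t) 0]'hnp ≠ ' ' := hp _ (List.getElem_mem hnp)
        simp [hne]
  · rw [if_neg hm]
    by_cases hz : hashLoop block.toList 0 = 0 ∨ hashLoop block.toList 0 > 6
    · rw [if_pos hz]
    · rw [if_neg hz]
      by_cases hlen : hashLoop block.toList 0 ≥ block.toList.length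
      · rw [if_pos hlen]
      · rw [if_neg hlen]
        cases hget : PySem.List.pyGet? block.toList ((hashLoop block.toList 0 : Nat) : Int) with
        | none => rfl
        | some c =>
          have hne : c ≠ ' ' := fun h => hm (h ▸ PySem.List.mem_of_pyGet?_eq_some _ hget)
          simp [hne]
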